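-- pv_equiv track=rewrite | github.com/datsciseol/algorithms | programmers/level1/downside/downside.py | solution
-- ===== SOURCE A (Python) =====
-- def solution(s):
--     lower_list = []
--     upper_list = []
--     for elem in s:
--         if elem.islower():
--             lower_list.append(elem)
--         else:
--             upper_list.append(elem)
--     lower_list.sort(reverse = True)
--     upper_list.sort(reverse = True)
--     result = (lower_list + upper_list)
--     answer = "".join(result)
--     return result
-- ===== SOURCE B (Python) =====
-- def solution(s):
--     present = set(s)
--     out = []
--     for code in range(122, 96, -1):
--         c = chr(code)
--         if c in present:
--             out += [c] * s.count(c)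
--     for code in range(127, -1, -1):
--         c = chr(code)
--         if not ('a' <= c <= 'z') and c in present:
--             out += [c] * s.count(c)
--     return out
-- ===== Notes on version B (the rewrite author's own statement) =====
-- stated objective: alternative
-- what changed: replaces the two reverse-sorts with a counting sort: a descending sweep of the fixed 128-code ASCII alphabet that emits each character count times (counts taken with str.count over the set of present characters)
import Mathlib
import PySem

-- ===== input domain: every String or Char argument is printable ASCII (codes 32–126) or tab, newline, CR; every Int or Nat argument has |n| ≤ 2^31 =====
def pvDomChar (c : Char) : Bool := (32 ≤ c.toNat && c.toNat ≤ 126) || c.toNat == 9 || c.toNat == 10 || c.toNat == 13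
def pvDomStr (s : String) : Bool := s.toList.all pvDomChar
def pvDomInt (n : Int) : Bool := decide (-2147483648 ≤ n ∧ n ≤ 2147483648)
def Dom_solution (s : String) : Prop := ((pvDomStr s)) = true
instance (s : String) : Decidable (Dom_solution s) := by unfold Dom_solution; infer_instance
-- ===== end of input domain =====

-- B replaces A's two reverse-sorts by a counting sort: a descending sweep of the fixed
-- ASCII alphabet that emits each character count-of-that-character times.

-- ===== PORT A =====
def solution (s : String) : List String :=
  let p := s.toList.foldl
    (fun (acc : List Char × List Char) elem =>
      if PySem.Chars.islower elem then (acc.1 ++ [elem], acc.2) else (acc.1, acc.2 ++ [elem]))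
    ([], [])
  let lower_list := PySem.List.sorted p.1 (fun x => x) true
  let upper_list := PySem.List.sorted p.2 (fun x => x) true
  let result := lower_list ++ upper_list
  result.map (fun c => String.ofList [c])

-- ===== PORT B =====
def solution_alt (s : String) : List String :=
  let present := PySem.Set.ofList s.toList
  let out := (PySem.List.pyRange 122 96 (-1)).foldl
    (fun out code =>
      let c := Char.ofNat code.toNat
      if PySem.Set.contains present c then
        out ++ List.replicate (PySem.Str.count s (String.ofList [c])) (String.ofList [c])
      else out) []
  (PySem.List.pyRange 127 (-1) (-1)).foldl
    (fun out code =>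
      let c := Char.ofNat code.toNat
      if (!(decide ('a' ≤ c) && decide (c ≤ 'z'))) && PySem.Set.contains present c then
        out ++ List.replicate (PySem.Str.count s (String.ofList [c])) (String.ofList [c])
      else out) out

-- ===== PRECONDITION & SPEC =====
def Spec_solution (s : String) (out : List String) : Prop := out = solution_alt s
instance (s : String) (out : List String) : Decidable (Spec_solution s out) := by unfold Spec_solution; infer_instance

-- ===== CLAIM (what is proved, stated in full; the proofs are below) =====
def Claim_equal_solution : Prop := ∀ (s : String), Dom_solution s → Spec_solution s (solution s)

-- ===== LEMMAS AND PROOFS =====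

-- the 26 lowercase codes, descending
def lowCodes : List Char := (List.range 26).map (fun k => Char.ofNat (122 - k))
-- the non-lowercase codes 0..127, descending
def othCodes : List Char :=
  ((List.range 128).map (fun k => Char.ofNat (127 - k))).filter
    (fun c => !(decide ('a' ≤ c) && decide (c ≤ 'z')))

-- counting-sort output over a code list
def bucket (codes : List Char) (l : List Char) : List Char :=
  codes.flatMap (fun c => List.replicate (l.count c) c)

theorem count_bucket (codes l : List Char) (x : Char) (h : codes.Nodup) :
    (bucket codes l).count x = if x ∈ codes then l.count x else 0 := by
  induction codes with
  | nil => simp [bucket]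
  | cons a t ih =>
    simp only [List.nodup_cons] at h
    simp only [bucket, List.flatMap_cons, List.count_append, List.count_replicate]
    rw [show (t.flatMap fun c => List.replicate (l.count c) c) = bucket t l from rfl, ih h.2]
    by_cases hx : x = a
    · subst hx; simp [h.1]
    · simp [hx, Ne.symm hx]

theorem bucket_perm (codes l : List Char) (hnd : codes.Nodup)
    (hsub : ∀ x ∈ l, x ∈ codes) : (bucket codes l).Perm l := by
  rw [List.perm_iff_count]
  intro x
  rw [count_bucket codes l x hnd]
  by_cases hx : x ∈ codes
  · simp [hx]
  · simp only [hx, if_false]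
    symm; rw [List.count_eq_zero]
    intro hxl; exact hx (hsub x hxl)

theorem bucket_pairwise (codes l : List Char) (h : codes.Pairwise (fun a b => b ≤ a)) :
    (bucket codes l).Pairwise (fun a b : Char => b ≤ a) := by
  rw [bucket, List.pairwise_flatMap]
  constructor
  · intro a _; exact List.pairwise_replicate.mpr (Or.inr le_rfl)
  · refine h.imp ?_
    intro a b hba x hx y hy
    rw [List.eq_of_mem_replicate hx, List.eq_of_mem_replicate hy]
    exact hba

theorem char_le_toNat {a b : Char} (h : b ≤ a) : b.toNat ≤ a.toNat := by
  rw [Char.le_def, UInt32.le_iff_toNat_le] at h; exact h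

-- descending reverse-sort equals the counting-sort output
theorem sorted_eq_bucket (codes l : List Char) (hnd : codes.Nodup)
    (hdesc : codes.Pairwise (fun a b => b ≤ a))
    (hsub : ∀ x ∈ l, x ∈ codes) :
    PySem.List.sorted l (fun x => x) true = bucket codes l := by
  apply PySem.List.eq_of_perm_of_pairwise_le_of_injective
      (key := fun c : Char => -(c.toNat : Int))
  · intro a b hab
    have h2 : a.toNat = b.toNat := by
      simp only [neg_inj, Int.natCast_inj] at hab; exact hab
    have := congrArg Char.ofNat h2
    rwa [Char.ofNat_toNat, Char.ofNat_toNat] at this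
  · exact (PySem.List.sorted_perm l (fun x => x) true).trans (bucket_perm codes l hnd hsub).symm
  · refine (PySem.List.sorted_pairwise_rev l (fun x => x)).imp ?_
    intro a b hba
    have := char_le_toNat hba; omega
  · refine (bucket_pairwise codes l hdesc).imp ?_
    intro a b hba
    have := char_le_toNat hba; omega

theorem mem_lowCodes {c : Char} (h : PySem.Chars.islower c = true) : c ∈ lowCodes := by
  simp only [PySem.Chars.islower, Bool.and_eq_true, decide_eq_true_eq] at h
  have h1 : 97 ≤ c.toNat := h.1
  have h2 : c.toNat ≤ 122 := char_le_toNat h.2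
  simp only [lowCodes, List.mem_map, List.mem_range]
  refine ⟨122 - c.toNat, by omega, ?_⟩
  rw [show 122 - (122 - c.toNat) = c.toNat by omega, Char.ofNat_toNat]

theorem mem_othCodes {c : Char} (hd : pvDomChar c = true)
    (h : PySem.Chars.islower c = false) : c ∈ othCodes := by
  have hle : c.toNat ≤ 127 := by
    simp only [pvDomChar, Bool.or_eq_true, Bool.and_eq_true, decide_eq_true_eq,
      Nat.beq_eq_true_eq] at hd
    omega
  simp only [othCodes, List.mem_filter, List.mem_map, List.mem_range]
  constructor
  · refine ⟨127 - c.toNat, by omega, ?_⟩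
    rw [show 127 - (127 - c.toNat) = c.toNat by omega, Char.ofNat_toNat]
  · show (!(decide ('a' ≤ c) && decide (c ≤ 'z'))) = true
    have : (decide ('a' ≤ c) && decide (c ≤ 'z')) = false := h
    simp [this]

theorem toNat_ofNat_small {n : Nat} (h : n < 128) : (Char.ofNat n).toNat = n := by
  rw [Char.toNat_ofNat, if_pos (Or.inl (by omega : n < 0xd800))]

theorem char_le_of_toNat_le {a b : Char} (h : a.toNat ≤ b.toNat) : a ≤ b := by
  rw [Char.le_def, UInt32.le_iff_toNat_le]; exact h

theorem lowDesc : lowCodes.Pairwise (fun a b : Char => b < a) := by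
  rw [lowCodes, List.pairwise_map]
  refine List.Pairwise.imp_of_mem ?_ List.pairwise_lt_range
  intro i j hi hj hij
  rw [List.mem_range] at hi hj
  rw [Char.lt_def, UInt32.lt_iff_toNat_lt]
  show (Char.ofNat (122 - j)).toNat < (Char.ofNat (122 - i)).toNat
  rw [toNat_ofNat_small (by omega), toNat_ofNat_small (by omega)]
  omega

theorem lowCodes_nodup : lowCodes.Nodup := lowDesc.imp (fun h => ne_of_gt h)

theorem lowCodes_desc : lowCodes.Pairwise (fun a b => b ≤ a) :=
  lowDesc.imp (fun h => le_of_lt h)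

theorem lowCodes_islower : ∀ c ∈ lowCodes, PySem.Chars.islower c = true := by
  intro c hc
  simp only [lowCodes, List.mem_map, List.mem_range] at hc
  obtain ⟨k, hk, rfl⟩ := hc
  have ht : (Char.ofNat (122 - k)).toNat = 122 - k := toNat_ofNat_small (by omega)
  simp only [PySem.Chars.islower, Bool.and_eq_true, decide_eq_true_eq]
  exact ⟨char_le_of_toNat_le (by rw [ht]; show 97 ≤ 122 - k; omega),
         char_le_of_toNat_le (by rw [ht]; show 122 - k ≤ 122; omega)⟩

theorem baseDesc : ((List.range 128).map (fun k => Char.ofNat (127 - k))).Pairwise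
    (fun a b : Char => b < a) := by
  rw [List.pairwise_map]
  refine List.Pairwise.imp_of_mem ?_ List.pairwise_lt_range
  intro i j hi hj hij
  rw [List.mem_range] at hi hj
  rw [Char.lt_def, UInt32.lt_iff_toNat_lt]
  show (Char.ofNat (127 - j)).toNat < (Char.ofNat (127 - i)).toNat
  rw [toNat_ofNat_small (by omega), toNat_ofNat_small (by omega)]
  omega

theorem othCodes_nodup : othCodes.Nodup :=
  (baseDesc.imp (fun h => ne_of_gt h)).filter _

theorem othCodes_desc : othCodes.Pairwise (fun a b => b ≤ a) :=
  (baseDesc.imp (fun h => le_of_lt h)).filter _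

theorem othCodes_not_islower : ∀ c ∈ othCodes, PySem.Chars.islower c = false := by
  intro c hc
  simp only [othCodes, List.mem_filter] at hc
  have h2 := hc.2
  rw [Bool.not_eq_true'] at h2
  exact h2

-- counts over the full string restrict to counts over the relevant filter
theorem bucket_filter (codes : List Char) (cs : List Char) (p : Char → Bool)
    (h : ∀ c ∈ codes, p c = true) : bucket codes cs = bucket codes (cs.filter p) := by
  unfold bucket
  rw [List.flatMap, List.flatMap]
  congr 1
  apply List.map_congr_left
  intro c hc
  rw [List.count_filter (h c hc)]

-- guarded extend-loop is a flatMap over the filtered list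
theorem foldl_append_if_flat {α β : Type} (p : α → Bool) (g : α → List β)
    (l : List α) (acc : List β) :
    l.foldl (fun acc x => if p x then acc ++ g x else acc) acc
      = acc ++ (l.filter p).flatMap g := by
  induction l generalizing acc with
  | nil => simp
  | cons a t ih =>
    by_cases hp : p a = true
    · simp [hp, ih, List.append_assoc]
    · simp [List.foldl_cons, hp, ih]

-- A's splitting fold computes the two filters
theorem splitFold_eq (cs : List Char) :
    cs.foldl (fun (acc : List Char × List Char) elem =>
        if PySem.Chars.islower elem then (acc.1 ++ [elem], acc.2) else (acc.1, acc.2 ++ [elem]))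
      ([], [])
      = (cs.filter (fun c => PySem.Chars.islower c),
         cs.filter (fun c => !PySem.Chars.islower c)) := by
  have hfun : (fun (acc : List Char × List Char) elem =>
      if PySem.Chars.islower elem then (acc.1 ++ [elem], acc.2) else (acc.1, acc.2 ++ [elem]))
      = (fun acc elem =>
          ((if PySem.Chars.islower elem then acc.1 ++ [elem] else acc.1),
           (if !PySem.Chars.islower elem then acc.2 ++ [elem] else acc.2))) := by
    funext acc elem
    by_cases h : PySem.Chars.islower elem <;> simp [h]
  rw [hfun,
      PySem.List.foldl_prod_mk
        (fun (a : List Char) e => if PySem.Chars.islower e then a ++ [e] else a)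
        (fun (b : List Char) e => if !PySem.Chars.islower e then b ++ [e] else b) cs [] [],
      PySem.List.foldl_append_if_eq_filter (fun c => PySem.Chars.islower c),
      PySem.List.foldl_append_if_eq_filter (fun c => !PySem.Chars.islower c)]
  simp

-- s.count(c) for a single character is the character count
theorem count_go_singleton (c : Char) (fuel : Nat) (l : List Char) (acc : Nat) :
    PySem.Chars.count.go [c] fuel l acc = acc + (l.take fuel).count c := by
  induction fuel generalizing l acc with
  | zero => simp [PySem.Chars.count.go]
  | succ n ih =>
    cases l with
    | nil => simp [PySem.Chars.count.go]
    | cons h t =>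
      rw [PySem.Chars.count.go]
      by_cases hc : c = h
      · subst hc
        simp [List.isPrefixOf, ih]
        omega
      · have hpre : [c].isPrefixOf (h :: t) = false := by
          simp [List.isPrefixOf, hc]
        simp [hpre, ih, List.count_cons]
        exact fun h' => hc h'.symm

theorem chars_count_singleton (l : List Char) (c : Char) :
    PySem.Chars.count l [c] = l.count c := by
  rw [PySem.Chars.count]
  simp only [List.isEmpty_cons, Bool.false_eq_true, if_false]
  rw [count_go_singleton, List.take_length]
  simp

theorem strCount_singleton (s : String) (c : Char) :
    PySem.Str.count s (String.ofList [c]) = s.toList.count c := by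
  rw [PySem.Str.count_eq]
  have h : (String.ofList [c]).toList = [c] := by simp
  rw [h, chars_count_singleton]

-- a guard on set membership is vacuous: absent characters have count zero
theorem guard_contains (s : String) (p : Int → Bool) :
    (fun (out : List String) (code : Int) =>
        if p code && PySem.Set.contains (PySem.Set.ofList s.toList) (Char.ofNat code.toNat) then
          out ++ List.replicate (PySem.Str.count s (String.ofList [Char.ofNat code.toNat]))
                   (String.ofList [Char.ofNat code.toNat])
        else out)
      = (fun out code =>
          if p code then
            out ++ List.replicate (PySem.Str.count s (String.ofList [Char.ofNat code.toNat]))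
                   (String.ofList [Char.ofNat code.toNat])
          else out) := by
  funext out code
  by_cases hm : Char.ofNat code.toNat ∈ s.toList
  · by_cases hp : p code = true <;> simp [hp, hm]
  · have hz : PySem.Chars.count s.toList [Char.ofNat code.toNat] = 0 := by
      rw [chars_count_singleton, List.count_eq_zero]; exact hm
    by_cases hp : p code = true <;> simp [hp, hm, hz]

theorem flatMap_codes (s : String) (L : List Int) :
    (L.flatMap (fun code =>
        List.replicate (PySem.Str.count s (String.ofList [Char.ofNat code.toNat]))
          (String.ofList [Char.ofNat code.toNat])))
      = (bucket (L.map (fun code => Char.ofNat code.toNat)) s.toList).map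
          (fun c => String.ofList [c]) := by
  have hg : (fun code : Int =>
        List.replicate (PySem.Str.count s (String.ofList [Char.ofNat code.toNat]))
          (String.ofList [Char.ofNat code.toNat]))
      = fun code : Int =>
          (List.replicate (s.toList.count (Char.ofNat code.toNat)) (Char.ofNat code.toNat)).map
            (fun c => String.ofList [c]) := by
    funext code
    rw [List.map_replicate, strCount_singleton]
  rw [hg, bucket, List.map_flatMap, List.flatMap_map]

theorem solution_alt_eq (s : String) :
    solution_alt s
      = ((bucket lowCodes s.toList).map (fun c => String.ofList [c]))
        ++ ((bucket othCodes s.toList).map (fun c => String.ofList [c])) := by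
  unfold solution_alt
  dsimp only
  rw [show (fun (out : List String) (code : Int) =>
        if PySem.Set.contains (PySem.Set.ofList s.toList) (Char.ofNat code.toNat) then
          out ++ List.replicate (PySem.Str.count s (String.ofList [Char.ofNat code.toNat]))
                   (String.ofList [Char.ofNat code.toNat])
        else out)
      = (fun out code =>
          out ++ List.replicate (PySem.Str.count s (String.ofList [Char.ofNat code.toNat]))
                   (String.ofList [Char.ofNat code.toNat])) from by
    have h := guard_contains s (fun _ => true)
    simpa using h]
  rw [guard_contains s
        (fun code => !(decide ('a' ≤ Char.ofNat code.toNat) && decide (Char.ofNat code.toNat ≤ 'z')))]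
  rw [foldl_append_if_flat, PySem.List.foldl_append_eq_flatMap, List.nil_append,
      flatMap_codes, flatMap_codes]
  have h1 : (PySem.List.pyRange 122 96 (-1)).map (fun code => Char.ofNat code.toNat)
      = lowCodes := by decide
  have h2 : (((PySem.List.pyRange 127 (-1) (-1)).filter (fun code =>
        !(decide ('a' ≤ Char.ofNat code.toNat) && decide (Char.ofNat code.toNat ≤ 'z')))).map
        (fun code => Char.ofNat code.toNat)) = othCodes := by decide
  rw [h1, h2]

-- ===== VERDICT (by name: the statement is the Claim_ definition above) =====
theorem solution_spec : Claim_equal_solution := by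
  intro s hdom
  unfold Spec_solution
  have hlowsub : ∀ x ∈ s.toList.filter (fun c => PySem.Chars.islower c), x ∈ lowCodes :=
    fun x hx => mem_lowCodes (List.of_mem_filter hx)
  have hothsub : ∀ x ∈ s.toList.filter (fun c => !PySem.Chars.islower c), x ∈ othCodes := by
    intro x hx
    have hd : pvDomChar x = true := by
      have := List.mem_of_mem_filter hx
      exact List.all_eq_true.mp hdom x this
    have hni : PySem.Chars.islower x = false := by
      have := List.of_mem_filter hx
      rwa [Bool.not_eq_true'] at this
    exact mem_othCodes hd hni
  show solution s = solution_alt s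
  rw [solution]
  simp only [splitFold_eq]
  rw [sorted_eq_bucket lowCodes _ lowCodes_nodup lowCodes_desc hlowsub,
      sorted_eq_bucket othCodes _ othCodes_nodup othCodes_desc hothsub,
      ← bucket_filter lowCodes s.toList _ lowCodes_islower,
      ← bucket_filter othCodes s.toList _
          (by intro c hc; rw [Bool.not_eq_true']; exact othCodes_not_islower c hc),
      solution_alt_eq, List.map_append]
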